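-- pv_equiv track=rewrite | github.com/Antos99999/Podstawy_Kryptografii | Lab1/src/lab1.py | relatively_prime_integers
-- ===== SOURCE A (Python) =====
-- import math
--
-- def relatively_prime_integers(n, limit):
--     if n <= 0 or limit <= 0:
--         return []
--
--     relatively_prime_numbers = []
--     for i in range(1, limit + 1):
--         if math.gcd(n, i) == 1:
--             relatively_prime_numbers.append(i)
--
--     return relatively_prime_numbers
-- ===== SOURCE B (Python) =====
-- def relatively_prime_integers(n, limit):
--     if n <= 0 or limit <= 0:
--         return []
--
--     # distinct prime factors of n by trial division
--     ps = []
--     m = n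
--     d = 2
--     while d * d <= m:
--         if m % d == 0:
--             ps.append(d)
--             while m % d == 0:
--                 m //= d
--         else:
--             d += 1
--     if m > 1:
--         ps.append(m)
--
--     return [i for i in range(1, limit + 1) if all(i % p != 0 for p in ps)]
-- ===== Notes on version B (the rewrite author's own statement) =====
-- stated objective: alternative
-- what changed: B first extracts the distinct prime factors of n by trial division and then keeps each i in 1..limit iff no prime factor divides it, instead of computing gcd(n,i) for every i.
import Mathlib
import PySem

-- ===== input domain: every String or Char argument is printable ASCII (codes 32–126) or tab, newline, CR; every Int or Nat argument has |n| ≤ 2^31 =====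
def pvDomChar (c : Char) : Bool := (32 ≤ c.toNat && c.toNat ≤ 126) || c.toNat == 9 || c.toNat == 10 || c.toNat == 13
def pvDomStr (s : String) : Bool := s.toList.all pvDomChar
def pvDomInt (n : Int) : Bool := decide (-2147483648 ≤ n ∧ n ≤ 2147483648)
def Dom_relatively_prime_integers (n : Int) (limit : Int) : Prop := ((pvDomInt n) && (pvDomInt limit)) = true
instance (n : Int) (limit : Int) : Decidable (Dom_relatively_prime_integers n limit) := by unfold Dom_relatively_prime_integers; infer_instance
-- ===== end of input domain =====

-- B replaces the per-element gcd test by trial-division factorisation of n followed by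
-- divisibility tests against its distinct prime factors (objective: alternative algorithm).

-- ===== PORT A =====
-- 'for i in range(1, limit+1): if math.gcd(n, i) == 1: append i'
def relatively_prime_integers (n : Int) (limit : Int) : List Int :=
  if n ≤ 0 ∨ limit ≤ 0 then []
  else
    (PySem.List.pyRange 1 (limit + 1) 1).foldl
      (fun acc i => if Int.gcd n i == 1 then acc ++ [i] else acc) []

-- ===== PORT B =====
-- 'while m % d == 0: m //= d'  (m, d kept as Nat: the guard in the caller ensures n > 0,
-- so the Python values are the same nonnegative integers)
def pvDivOut (m d : Nat) : Nat :=
  if h : 2 ≤ d ∧ 0 < m ∧ d ∣ m then pvDivOut (m / d) d else m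
termination_by m
decreasing_by exact Nat.div_lt_self h.2.1 (by omega)

theorem pvDivOut_le (m d : Nat) : pvDivOut m d ≤ m := by
  fun_induction pvDivOut with
  | case1 m h IH =>
    exact le_trans IH (Nat.le_of_lt (Nat.div_lt_self h.2.1 (by omega)))
  | case2 m h => exact le_refl m

theorem pvDivOut_lt (m d : Nat) (hd : 2 ≤ d) (hm : 0 < m) (hdvd : d ∣ m) :
    pvDivOut m d < m := by
  rw [pvDivOut, dif_pos ⟨hd, hm, hdvd⟩]
  exact lt_of_le_of_lt (pvDivOut_le _ _) (Nat.div_lt_self hm (by omega))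

-- the outer 'while d * d <= m' loop of B, collecting the distinct prime factors of m
def pvFactors (m d : Nat) : List Nat :=
  if h : 2 ≤ d ∧ d * d ≤ m then
    if hdvd : d ∣ m then d :: pvFactors (pvDivOut m d) d
    else pvFactors m (d + 1)
  else if 1 < m then [m] else []
termination_by (m, m + 1 - d)
decreasing_by
  · exact Prod.Lex.left _ _ (pvDivOut_lt m d h.1 (by nlinarith [h.2]) hdvd)
  · exact Prod.Lex.right m (by have h2 := h.2; have := Nat.le_mul_of_pos_left d (show (0:Nat) < d from by omega); omega)

-- '[i for i in range(1, limit+1) if all(i % p != 0 for p in ps)]'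
def relatively_prime_integers_alt (n : Int) (limit : Int) : List Int :=
  if n ≤ 0 ∨ limit ≤ 0 then []
  else
    let ps := pvFactors n.toNat 2
    (PySem.List.pyRange 1 (limit + 1) 1).filter
      (fun i => ps.all (fun p => !(PySem.Int.mod i (p : Int) == 0)))

-- ===== PRECONDITION & SPEC =====
def Spec_relatively_prime_integers (n : Int) (limit : Int) (out : List Int) : Prop := out = relatively_prime_integers_alt n limit
instance (n : Int) (limit : Int) (out : List Int) : Decidable (Spec_relatively_prime_integers n limit out) := by unfold Spec_relatively_prime_integers; infer_instance

-- ===== CLAIM (what is proved, stated in full; the proofs are below) =====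
def Claim_equal_relatively_prime_integers : Prop := ∀ (n : Int) (limit : Int), Dom_relatively_prime_integers n limit → Spec_relatively_prime_integers n limit (relatively_prime_integers n limit)

-- ===== LEMMAS AND PROOFS =====

theorem pvDivOut_dvd (m d : Nat) : pvDivOut m d ∣ m := by
  fun_induction pvDivOut with
  | case1 m h IH =>
    exact dvd_trans IH ⟨d, (Nat.div_mul_cancel h.2.2).symm⟩
  | case2 m h => exact dvd_refl m

theorem coprime_pvDivOut (d i : Nat) : ∀ m, 0 < m → 2 ≤ d → d ∣ m →
    (Nat.Coprime m i ↔ (Nat.Coprime d i ∧ Nat.Coprime (pvDivOut m d) i)) := by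
  intro m
  induction m using Nat.strong_induction_on with
  | _ m IH =>
    intro hm hd hdvd
    rw [pvDivOut, dif_pos ⟨hd, hm, hdvd⟩]
    have hq : 0 < m / d := Nat.div_pos (Nat.le_of_dvd hm hdvd) (by omega)
    have hqlt : m / d < m := Nat.div_lt_self hm (by omega)
    have hsplit : Nat.Coprime m i ↔ (Nat.Coprime d i ∧ Nat.Coprime (m / d) i) := by
      conv_lhs => rw [show m = d * (m / d) from (Nat.mul_div_cancel' hdvd).symm]
      exact Nat.coprime_mul_iff_left
    rw [hsplit]
    by_cases hdd : d ∣ m / d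
    · rw [IH (m / d) hqlt hq hd hdd]
      tauto
    · rw [pvDivOut, dif_neg (by tauto)]

theorem prime_of_min (d m : Nat) (hd : 2 ≤ d) (hdvd : d ∣ m)
    (hmin : ∀ e, 2 ≤ e → e < d → ¬ e ∣ m) : Nat.Prime d := by
  rw [Nat.prime_def_lt]
  refine ⟨hd, fun e helt hedvd => ?_⟩
  by_contra hne
  have he0 : e ≠ 0 := by
    rintro rfl
    exact absurd (Nat.eq_zero_of_zero_dvd hedvd) (by omega)
  have he2 : 2 ≤ e := by omega
  exact hmin e he2 helt (dvd_trans hedvd hdvd)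

theorem prime_of_no_small (m d : Nat) (h1 : 1 < m) (hlt : m < d * d)
    (hmin : ∀ e, 2 ≤ e → e < d → ¬ e ∣ m) : Nat.Prime m := by
  rw [Nat.prime_def_le_sqrt]
  refine ⟨h1, fun e he hsq => ?_⟩
  have hee : e * e ≤ m := Nat.le_sqrt.mp hsq
  have hed : e < d := by nlinarith
  exact hmin e he hed

theorem pvFactors_coprime (i : Nat) : ∀ m d, 0 < m → 2 ≤ d →
    (∀ e, 2 ≤ e → e < d → ¬ e ∣ m) →
    ((∀ p ∈ pvFactors m d, ¬ p ∣ i) ↔ Nat.Coprime m i) := by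
  intro m d hm hd hmin
  rw [pvFactors]
  by_cases hc : 2 ≤ d ∧ d * d ≤ m
  · rw [dif_pos hc]
    by_cases hdvd : d ∣ m
    · rw [dif_pos hdvd]
      have hprime : Nat.Prime d := prime_of_min d m hd hdvd hmin
      have hpos : 0 < pvDivOut m d := Nat.pos_of_dvd_of_pos (pvDivOut_dvd m d) hm
      have hmin' : ∀ e, 2 ≤ e → e < d → ¬ e ∣ pvDivOut m d := fun e he hlt hdv =>
        hmin e he hlt (dvd_trans hdv (pvDivOut_dvd m d))
      have hrec := pvFactors_coprime i (pvDivOut m d) d hpos hd hmin'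
      simp only [List.mem_cons, forall_eq_or_imp]
      rw [hrec, coprime_pvDivOut d i m hm hd hdvd, hprime.coprime_iff_not_dvd]
    · rw [dif_neg hdvd]
      have hmin' : ∀ e, 2 ≤ e → e < d + 1 → ¬ e ∣ m := by
        intro e he hlt
        by_cases hed : e = d
        · subst hed; exact hdvd
        · exact hmin e he (by omega)
      exact pvFactors_coprime i m (d + 1) hm (by omega) hmin'
  · rw [dif_neg hc]
    have hlt : m < d * d := by
      rcases not_and_or.mp hc with h | h
      · omega
      · omega
    by_cases h1 : 1 < m
    · rw [if_pos h1]
      have hprime : Nat.Prime m := prime_of_no_small m d h1 hlt hmin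
      simp only [List.mem_singleton, forall_eq]
      exact (hprime.coprime_iff_not_dvd).symm
    · rw [if_neg h1]
      have : m = 1 := by omega
      simp [this]
termination_by m d => (m, m + 1 - d)
decreasing_by
  · exact Prod.Lex.left _ _ (pvDivOut_lt m d hc.1 (by nlinarith [hc.2]) hdvd)
  · exact Prod.Lex.right m (by have h2 := hc.2; have := Nat.le_mul_of_pos_left d (show (0:Nat) < d from by omega); omega)

-- ===== VERDICT (by name: the statement is the Claim_ definition above) =====
theorem relatively_prime_integers_spec : Claim_equal_relatively_prime_integers := by
  intro n limit _
  unfold Spec_relatively_prime_integers relatively_prime_integers relatively_prime_integers_alt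
  by_cases hg : n ≤ 0 ∨ limit ≤ 0
  · simp [hg]
  · rw [if_neg hg, if_neg hg]
    rw [not_or, not_le, not_le] at hg
    obtain ⟨hn, hl⟩ := hg
    rw [PySem.List.foldl_append_if_eq_filter]
    simp only [List.nil_append]
    apply List.filter_congr
    intro x hx
    have hx1 : 1 ≤ x ∧ x < limit + 1 := (PySem.List.mem_pyRange_one).mp hx
    have hx0 : 0 < x := by omega
    have hgcd : Int.gcd n x = Nat.gcd n.toNat x.toNat := by
      unfold Int.gcd
      congr 1 <;> omega
    have hfac := pvFactors_coprime x.toNat n.toNat 2 (by omega) (le_refl 2)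
      (fun e he hlt _ => by omega)
    have hp2 : ∀ p ∈ pvFactors n.toNat 2, ((p : Int) ∣ x ↔ p ∣ x.toNat) := by
      intro p _
      constructor
      · intro hpd
        have : (p : Int) ∣ (x.toNat : Int) := by rwa [Int.toNat_of_nonneg (by omega)]
        exact_mod_cast this
      · intro hpd
        have : (p : Int) ∣ (x.toNat : Int) := Int.natCast_dvd_natCast.mpr hpd
        rwa [Int.toNat_of_nonneg (by omega)] at this
    rw [Bool.eq_iff_iff]
    simp only [beq_iff_eq, List.all_eq_true, Bool.not_eq_true', beq_eq_false_iff_ne, ne_eq]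
    rw [hgcd]
    constructor
    · intro hco p hp
      rw [PySem.Int.mod_eq_zero_iff_dvd]
      rw [hp2 p hp]
      exact (hfac.mpr hco) p hp
    · intro hall
      apply hfac.mp
      intro p hp
      rw [← hp2 p hp, ← PySem.Int.mod_eq_zero_iff_dvd]
      exact hall p hp
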